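-- pv_equiv track=rewrite | github.com/orAzimut/Experiment-Analysis | main_dashboard.py | split_long_name
-- ===== SOURCE A (Python) =====
-- def split_long_name(name, max_len=18):
--     """Split a long name into two lines for better graph display."""
--     if len(name) <= max_len:
--         return name
--     # Try to split at the nearest underscore, dash, or space before max_len
--     for sep in ['_', '-', ' ']:
--         idx = name.rfind(sep, 0, max_len)
--         if idx != -1:
--             return name[:idx+1] + "<br>" + name[idx+1:]
--     # If no separator found, just split at max_len
--     return name[:max_len] + "<br>" + name[max_len:]
-- ===== SOURCE B (Python) =====
-- def split_long_name(name, max_len=18):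
--     """Split a long name into two lines for better graph display."""
--     if len(name) <= max_len:
--         return name
--     # Single pass over the prefix: keep the separator occurrence that maximizes
--     # the pair (priority, position) lexicographically ('_' > '-' > ' ', later > earlier).
--     best = None
--     for i, ch in enumerate(name[:max_len]):
--         if ch == '_':
--             p = 2
--         elif ch == '-':
--             p = 1
--         elif ch == ' ':
--             p = 0
--         else:
--             continue
--         if best is None or (p, i) > best:
--             best = (p, i)
--     cut = max_len if best is None else best[1] + 1
--     return name[:cut] + "<br>" + name[cut:]
-- ===== Notes on version B (the rewrite author's own statement) =====
-- stated objective: alternative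
-- what changed: Replaces the per-separator backward rfind scans and priority loop by one forward max-reduction over the prefix that keeps the single best candidate under the lexicographic order (separator priority, position), then cuts there.
import Mathlib
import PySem

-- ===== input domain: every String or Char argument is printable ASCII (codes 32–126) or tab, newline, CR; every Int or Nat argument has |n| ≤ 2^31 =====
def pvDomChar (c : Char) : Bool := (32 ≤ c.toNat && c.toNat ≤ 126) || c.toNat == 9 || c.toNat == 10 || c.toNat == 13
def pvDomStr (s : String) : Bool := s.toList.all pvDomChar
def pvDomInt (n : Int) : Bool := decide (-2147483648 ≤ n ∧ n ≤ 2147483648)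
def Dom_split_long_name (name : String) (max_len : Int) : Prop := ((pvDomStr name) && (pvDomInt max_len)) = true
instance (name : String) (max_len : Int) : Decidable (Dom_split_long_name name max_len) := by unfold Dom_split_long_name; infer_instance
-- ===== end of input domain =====

-- B replaces A's per-separator backward rfind scans and priority loop by ONE forward pass over
-- the prefix that keeps the best candidate under the lexicographic order (separator priority,
-- position) and cuts there (objective: alternative — one max-reduction instead of staged scans).


-- ===== PORT A =====
-- name[:i] + "<br>" + name[i:]  (shared shape of the return expressions of both ports)
def pvSplitAt (name : String) (i : Int) : String :=
  String.ofList (PySem.List.slice name.toList none (some i) ++ "<br>".toList ++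
             PySem.List.slice name.toList (some i) none)

-- the 'for sep in ['_', '-', ' ']' loop of A: first separator with rfind ≠ -1 wins
def aSepLoop (name : String) (max_len : Int) : List String → Option String
  | [] => none
  | sep :: rest =>
    if PySem.Str.rfindFrom name sep 0 (some max_len) ≠ -1 then
      some (pvSplitAt name (PySem.Str.rfindFrom name sep 0 (some max_len) + 1))
    else aSepLoop name max_len rest

def split_long_name (name : String) (max_len : Int) : String :=
  if PySem.Str.len name ≤ max_len then name
  else
    match aSepLoop name max_len ["_", "-", " "] with
    | some r => r
    | none => pvSplitAt name max_len

-- ===== PORT B =====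
-- the 'if ch == …: p = …' chain of B
def bRank (ch : Char) : Option Int :=
  if ch = '_' then some 2 else if ch = '-' then some 1 else if ch = ' ' then some 0 else none

-- loop body of B: keep the (priority, index) pair that is lexicographically largest
def bStep (best : Option (Int × Int)) (p : Int × Char) : Option (Int × Int) :=
  match bRank p.2 with
  | none => best
  | some r =>
    match best with
    | none => some (r, p.1)
    | some b => if b.1 < r ∨ (b.1 = r ∧ b.2 < p.1) then some (r, p.1) else some b

def split_long_name_alt (name : String) (max_len : Int) : String :=
  if PySem.Str.len name ≤ max_len then name
  else
    let best := (PySem.List.enumerate (PySem.List.slice name.toList none (some max_len))).foldl bStep none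
    let cut := match best with
      | none => max_len
      | some b => b.2 + 1
    pvSplitAt name cut

-- ===== PRECONDITION & SPEC =====
def Spec_split_long_name (name : String) (max_len : Int) (out : String) : Prop := out = split_long_name_alt name max_len
instance (name : String) (max_len : Int) (out : String) : Decidable (Spec_split_long_name name max_len out) := by unfold Spec_split_long_name; infer_instance

-- ===== CLAIM (what is proved, stated in full; the proofs are below) =====
def Claim_equal_split_long_name : Prop := ∀ (name : String) (max_len : Int), Dom_split_long_name name max_len → Spec_split_long_name name max_len (split_long_name name max_len)

-- ===== LEMMAS AND PROOFS =====

-- last index at which c occurs (proof-side characterisation shared by both ports)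
def lastIdxR : List Char → Char → Option Nat
  | [], _ => none
  | ch :: rest, c =>
    match lastIdxR rest c with
    | some i => some (i + 1)
    | none => if ch = c then some 0 else none

theorem lastIdxR_append_singleton (xs : List Char) (x c : Char) :
    lastIdxR (xs ++ [x]) c = if x = c then some xs.length else lastIdxR xs c := by
  induction xs with
  | nil => simp [lastIdxR]
  | cons y ys ih =>
    simp only [List.cons_append, lastIdxR, ih]
    split_ifs <;> simp

theorem lastIdxR_lt_length (xs : List Char) (c : Char) (i : Nat)
    (h : lastIdxR xs c = some i) : i < xs.length := by
  induction xs generalizing i with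
  | nil => simp [lastIdxR] at h
  | cons y ys ih =>
    simp only [lastIdxR] at h
    rcases hr : lastIdxR ys c with _ | j
    · rw [hr] at h
      split_ifs at h <;> simp_all <;> omega
    · rw [hr] at h
      have := ih j hr
      simp at h
      simp [← h]
      omega

theorem isPrefixOf_singleton_drop (s : List Char) (c : Char) (j : Nat) :
    [c].isPrefixOf (s.drop j) = true ↔ s[j]? = some c := by
  rw [List.isPrefixOf_iff_prefix, ← List.head?_drop]
  cases s.drop j <;> simp [List.prefix_cons_iff, eq_comm]

theorem go_eq_lastIdxR (s : List Char) (c : Char) (m : Nat) :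
    PySem.Chars.rfind.go s [c] m =
      match lastIdxR (s.take (m + 1)) c with
      | some i => (i : Int)
      | none => -1 := by
  induction m with
  | zero =>
    rw [PySem.Chars.rfind.go]
    rcases s with _ | ⟨x, rest⟩
    · simp [lastIdxR, List.isPrefixOf]
    · simp only [List.take_succ_cons, List.take_zero, lastIdxR, List.isPrefixOf]
      split_ifs with h <;> simp_all
  | succ j ih =>
    rw [PySem.Chars.rfind.go]
    by_cases hj : j + 1 < s.length
    · have htake : s.take (j + 2) = s.take (j + 1) ++ [s[j+1]] := by
        rw [List.take_add_one, List.getElem?_eq_getElem hj]; rfl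
      have hlen : (s.take (j + 1)).length = j + 1 := by simp; omega
      by_cases hc2 : s[j+1] = c
      · have hpf : [c].isPrefixOf (s.drop (j+1)) = true := by
          rw [isPrefixOf_singleton_drop, List.getElem?_eq_getElem hj, hc2]
        rw [htake, lastIdxR_append_singleton]
        simp [hpf, hc2, hlen]
      · have hpf : ¬ ([c].isPrefixOf (s.drop (j+1)) = true) := by
          rw [isPrefixOf_singleton_drop, List.getElem?_eq_getElem hj]
          simp [hc2]
        rw [htake, lastIdxR_append_singleton]
        simp only [Bool.not_eq_true] at hpf
        simp [hpf, hc2, ih]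
    · have hdrop : s.drop (j + 1) = [] := List.drop_eq_nil_of_le (by omega)
      have htake : s.take (j + 2) = s.take (j + 1) := by
        rw [List.take_of_length_le (by omega), List.take_of_length_le (by omega)]
      rw [hdrop, htake]
      simpa [List.isPrefixOf] using ih

theorem rfind_eq_lastIdxR (s : List Char) (c : Char) :
    PySem.Chars.rfind s [c] =
      match lastIdxR s c with
      | some i => (i : Int)
      | none => -1 := by
  rw [PySem.Chars.rfind, go_eq_lastIdxR, List.take_of_length_le (by omega)]

theorem slice_to_eq_take (s : List Char) (m : Int) :
    PySem.List.slice s none (some m) = s.take (PySem.List.clampIdx s.length m) := by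
  simp [PySem.List.slice]

theorem rfindFrom_eq_lastIdxR (s : List Char) (c : Char) (m : Int) :
    PySem.Chars.rfindFrom s [c] 0 (some m) =
      match lastIdxR (PySem.List.slice s none (some m)) c with
      | some i => (i : Int)
      | none => -1 := by
  rw [PySem.Chars.rfindFrom, slice_to_eq_take]
  rw [if_neg (show ¬((0:Int) < 0) by omega)]
  have he : ¬ ((if (s.length : Int) < m then (s.length : Int)
       else if m < 0 then (if m + s.length < 0 then 0 else m + s.length) else m) < (0:Int)) := by
    split_ifs <;> omega
  rw [if_neg he]
  have hcl : (if (s.length : Int) < m then (s.length : Int)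
       else if m < 0 then (if m + s.length < 0 then 0 else m + s.length) else m).toNat
       = PySem.List.clampIdx s.length m := by
    unfold PySem.List.clampIdx
    split_ifs <;> simp_all <;> omega
  rw [hcl]
  simp only [Int.toNat_zero, List.drop_zero]
  rw [rfind_eq_lastIdxR]
  rcases h : lastIdxR (s.take (PySem.List.clampIdx s.length m)) c with _ | i <;> simp

-- what B's fold computes: the lexicographically best (priority, last index) among '_','-',' '
def bestSpec (pre : List Char) : Option (Int × Int) :=
  match lastIdxR pre '_' with
  | some i => some (2, (i : Int))
  | none =>
    match lastIdxR pre '-' with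
    | some i => some (1, (i : Int))
    | none =>
      match lastIdxR pre ' ' with
      | some i => some (0, (i : Int))
      | none => none

theorem fold_eq_bestSpec (pre : List Char) :
    (PySem.List.enumerate pre 0).foldl bStep none = bestSpec pre := by
  induction pre using List.reverseRecOn with
  | nil => simp [PySem.List.enumerate_nil, bestSpec, lastIdxR]
  | append_singleton xs x ih =>
    rw [PySem.List.enumerate_append, List.foldl_append, ih]
    have hx : PySem.List.enumerate [x] (0 + (xs.length : Int)) = [((xs.length : Int), x)] := by
      simp [PySem.List.enumerate_cons, PySem.List.enumerate_nil]
    rw [hx, List.foldl_cons, List.foldl_nil]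
    have hlt_ : ∀ i, lastIdxR xs '_' = some i → (i : Int) < (xs.length : Int) := by
      intro i h; exact_mod_cast lastIdxR_lt_length xs _ i h
    have hltd : ∀ i, lastIdxR xs '-' = some i → (i : Int) < (xs.length : Int) := by
      intro i h; exact_mod_cast lastIdxR_lt_length xs _ i h
    have hlts : ∀ i, lastIdxR xs ' ' = some i → (i : Int) < (xs.length : Int) := by
      intro i h; exact_mod_cast lastIdxR_lt_length xs _ i h
    unfold bestSpec
    rw [lastIdxR_append_singleton, lastIdxR_append_singleton, lastIdxR_append_singleton]
    by_cases h_ : x = '_'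
    · subst h_
      rcases h1 : lastIdxR xs '_' with _ | i <;>
      rcases h2 : lastIdxR xs '-' with _ | j <;>
      rcases h3 : lastIdxR xs ' ' with _ | k <;>
        simp_all [bStep, bRank] <;> omega
    · by_cases hd : x = '-'
      · subst hd
        rcases h1 : lastIdxR xs '_' with _ | i <;>
        rcases h2 : lastIdxR xs '-' with _ | j <;>
        rcases h3 : lastIdxR xs ' ' with _ | k <;>
          simp_all [bStep, bRank] <;> omega
      · by_cases hs : x = ' '
        · subst hs
          rcases h1 : lastIdxR xs '_' with _ | i <;>
          rcases h2 : lastIdxR xs '-' with _ | j <;>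
          rcases h3 : lastIdxR xs ' ' with _ | k <;>
            simp_all [bStep, bRank] <;> omega
        · rcases h1 : lastIdxR xs '_' with _ | i <;>
          rcases h2 : lastIdxR xs '-' with _ | j <;>
          rcases h3 : lastIdxR xs ' ' with _ | k <;>
            simp_all [bStep, bRank]

-- ===== VERDICT (by name: the statement is the Claim_ definition above) =====
theorem split_long_name_spec : Claim_equal_split_long_name := by
  intro name max_len _
  unfold Spec_split_long_name split_long_name split_long_name_alt
  by_cases hshort : PySem.Str.len name ≤ max_len
  · rw [if_pos hshort, if_pos hshort]
  · rw [if_neg hshort, if_neg hshort]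
    simp only [fold_eq_bestSpec]
    have hru : PySem.Str.rfindFrom name "_" 0 (some max_len) =
        match lastIdxR (PySem.List.slice name.toList none (some max_len)) '_' with
        | some i => (i : Int) | none => -1 := by
      rw [PySem.Str.rfindFrom_eq]; exact rfindFrom_eq_lastIdxR _ _ _
    have hrd : PySem.Str.rfindFrom name "-" 0 (some max_len) =
        match lastIdxR (PySem.List.slice name.toList none (some max_len)) '-' with
        | some i => (i : Int) | none => -1 := by
      rw [PySem.Str.rfindFrom_eq]; exact rfindFrom_eq_lastIdxR _ _ _
    have hrs : PySem.Str.rfindFrom name " " 0 (some max_len) =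
        match lastIdxR (PySem.List.slice name.toList none (some max_len)) ' ' with
        | some i => (i : Int) | none => -1 := by
      rw [PySem.Str.rfindFrom_eq]; exact rfindFrom_eq_lastIdxR _ _ _
    unfold aSepLoop bestSpec
    rcases h1 : lastIdxR (PySem.List.slice name.toList none (some max_len)) '_' with _ | i <;>
    rcases h2 : lastIdxR (PySem.List.slice name.toList none (some max_len)) '-' with _ | j <;>
    rcases h3 : lastIdxR (PySem.List.slice name.toList none (some max_len)) ' ' with _ | k <;>
      simp_all [aSepLoop]
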